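-- pv_equiv track=rewrite | github.com/hudsonschmidt/homebound | backend/src/api/friends.py | _calculate_achievements_count_from_data
-- ===== SOURCE A (Python) =====
-- def _calculate_achievements_count_from_data(
--     total_trips: int, total_hours: int, unique_activities: int, unique_locations: int
-- ) -> int:
--     """Calculate achievements from pre-fetched data (no DB queries)."""
--     count = 0
--
--     # Total Trips achievements
--     for threshold in [1, 5, 10, 25, 50, 100, 150, 200, 250, 500, 1000]:
--         if total_trips >= threshold:
--             count += 1
--
--     # Adventure Time achievements (hours)
--     for threshold in [1, 10, 50, 100, 250, 500, 1000, 2500]: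
--         if total_hours >= threshold:
--             count += 1
--
--     # Activities tried achievements
--     for threshold in [1, 3, 5, 10, 15, 20]:
--         if unique_activities >= threshold:
--             count += 1
--
--     # Locations achievements
--     for threshold in [1, 5, 10, 25, 50, 100, 250]:
--         if unique_locations >= threshold:
--             count += 1
--
--     return count
-- ===== SOURCE B (Python) =====
-- _THRESHOLDS = (
--     [1, 5, 10, 25, 50, 100, 150, 200, 250, 500, 1000],   # total trips
--     [1, 10, 50, 100, 250, 500, 1000, 2500],              # hours
--     [1, 3, 5, 10, 15, 20],                               # activities
--     [1, 5, 10, 25, 50, 100, 250],                        # locations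
-- )
--
--
-- def _bisect_right(a, x):
--     """Index of first threshold > x in sorted list a (binary search)."""
--     lo, hi = 0, len(a)
--     while lo < hi:
--         mid = (lo + hi) // 2
--         if x < a[mid]:
--             hi = mid
--         else:
--             lo = mid + 1
--     return lo
--
--
-- def _calculate_achievements_count_from_data(
--     total_trips: int, total_hours: int, unique_activities: int, unique_locations: int
-- ) -> int:
--     values = (total_trips, total_hours, unique_activities, unique_locations)
--     return sum(_bisect_right(t, v) for t, v in zip(_THRESHOLDS, values))
-- ===== Notes on version B (the rewrite author's own statement) =====
-- stated objective: alternative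
-- what changed: Replaces the four linear comparison loops by a hand-written binary search (bisect_right) on each sorted threshold list, summing the four insertion points.
import Mathlib
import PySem

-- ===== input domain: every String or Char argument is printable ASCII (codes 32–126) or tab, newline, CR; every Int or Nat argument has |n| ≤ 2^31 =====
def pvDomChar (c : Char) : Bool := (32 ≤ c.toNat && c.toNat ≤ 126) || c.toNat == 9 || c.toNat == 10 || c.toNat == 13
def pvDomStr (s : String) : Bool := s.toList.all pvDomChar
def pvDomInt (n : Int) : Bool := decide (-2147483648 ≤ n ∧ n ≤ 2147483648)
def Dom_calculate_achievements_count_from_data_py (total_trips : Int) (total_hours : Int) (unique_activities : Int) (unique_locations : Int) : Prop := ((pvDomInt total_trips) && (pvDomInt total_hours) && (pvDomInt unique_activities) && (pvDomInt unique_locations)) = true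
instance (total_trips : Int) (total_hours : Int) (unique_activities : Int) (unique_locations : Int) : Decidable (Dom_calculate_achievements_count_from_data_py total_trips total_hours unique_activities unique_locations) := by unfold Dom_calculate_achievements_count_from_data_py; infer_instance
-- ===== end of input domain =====

-- B replaces the four linear comparison loops by a binary search (bisect_right)
-- over each sorted threshold list; objective: alternative algorithm.

-- ===== PORT A =====
-- Each Python for-loop "for threshold in L: if v >= threshold: count += 1" becomes a foldl
-- over the same literal list, threading the same count.
def calculate_achievements_count_from_data_py (total_trips : Int) (total_hours : Int) (unique_activities : Int) (unique_locations : Int) : Int :=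
  let count : Int := 0
  let count := [1, 5, 10, 25, 50, 100, 150, 200, 250, 500, 1000].foldl
    (fun c (threshold : Int) => if total_trips ≥ threshold then c + 1 else c) count
  let count := [1, 10, 50, 100, 250, 500, 1000, 2500].foldl
    (fun c (threshold : Int) => if total_hours ≥ threshold then c + 1 else c) count
  let count := [1, 3, 5, 10, 15, 20].foldl
    (fun c (threshold : Int) => if unique_activities ≥ threshold then c + 1 else c) count
  let count := [1, 5, 10, 25, 50, 100, 250].foldl
    (fun c (threshold : Int) => if unique_locations ≥ threshold then c + 1 else c) count
  count

-- ===== PORT B =====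
-- Source B's hand-written bisect_right: while lo < hi loop becomes recursion on hi - lo.
def pvBisectAux (a : List Int) (x : Int) (lo hi : Nat) : Nat :=
  if _h : lo < hi then
    let mid := (lo + hi) / 2
    if x < a.getD mid 0 then pvBisectAux a x lo mid
    else pvBisectAux a x (mid + 1) hi
  else lo
termination_by hi - lo
decreasing_by all_goals omega

def pvBisectRight (a : List Int) (x : Int) : Int :=
  (pvBisectAux a x 0 a.length : Int)

def calculate_achievements_count_from_data_py_alt (total_trips : Int) (total_hours : Int) (unique_activities : Int) (unique_locations : Int) : Int :=
  pvBisectRight [1, 5, 10, 25, 50, 100, 150, 200, 250, 500, 1000] total_trips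
  + pvBisectRight [1, 10, 50, 100, 250, 500, 1000, 2500] total_hours
  + pvBisectRight [1, 3, 5, 10, 15, 20] unique_activities
  + pvBisectRight [1, 5, 10, 25, 50, 100, 250] unique_locations

-- ===== PRECONDITION & SPEC =====
def Spec_calculate_achievements_count_from_data_py (total_trips : Int) (total_hours : Int) (unique_activities : Int) (unique_locations : Int) (out : Int) : Prop := out = calculate_achievements_count_from_data_py_alt total_trips total_hours unique_activities unique_locations
instance (total_trips : Int) (total_hours : Int) (unique_activities : Int) (unique_locations : Int) (out : Int) : Decidable (Spec_calculate_achievements_count_from_data_py total_trips total_hours unique_activities unique_locations out) := by unfold Spec_calculate_achievements_count_from_data_py; infer_instance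

-- ===== CLAIM (what is proved, stated in full; the proofs are below) =====
def Claim_equal_calculate_achievements_count_from_data_py : Prop := ∀ (total_trips : Int) (total_hours : Int) (unique_activities : Int) (unique_locations : Int), Dom_calculate_achievements_count_from_data_py total_trips total_hours unique_activities unique_locations → Spec_calculate_achievements_count_from_data_py total_trips total_hours unique_activities unique_locations (calculate_achievements_count_from_data_py total_trips total_hours unique_activities unique_locations)

-- ===== LEMMAS AND PROOFS =====

lemma foldl_count_shift (L : List Int) (x : Int) (c : Int) :
    L.foldl (fun c (t : Int) => if x ≥ t then c + 1 else c) c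
      = c + L.foldl (fun c (t : Int) => if x ≥ t then c + 1 else c) 0 := by
  induction L generalizing c with
  | nil => simp
  | cons hd tl ih =>
    simp only [List.foldl]
    split_ifs with hc
    · rw [ih, ih (0 + 1)]
      omega
    · rw [ih]

lemma fold_eq_countP (L : List Int) (x : Int) :
    L.foldl (fun c (t : Int) => if x ≥ t then c + 1 else c) 0
      = (L.countP (fun t => decide (t ≤ x)) : Int) := by
  induction L with
  | nil => simp
  | cons hd tl ih =>
    simp only [List.foldl, List.countP_cons]
    rw [foldl_count_shift, ih]
    by_cases h : hd ≤ x
    · rw [if_pos (by omega : x ≥ hd)]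
      simp only [h, decide_true]
      push_cast
      omega
    · rw [if_neg (by omega : ¬ x ≥ hd)]
      simp only [h, decide_false]
      push_cast
      omega

lemma countP_eq_split (a : List Int) (x : Int) (lo : Nat) (hlo : lo ≤ a.length)
    (hlow : ∀ i : Nat, i < lo → (h : i < a.length) → a[i] ≤ x)
    (hhigh : ∀ i : Nat, lo ≤ i → (h : i < a.length) → x < a[i]) :
    a.countP (fun t => decide (t ≤ x)) = lo := by
  have hsplit : a = a.take lo ++ a.drop lo := (List.take_append_drop lo a).symm
  rw [hsplit, List.countP_append]
  have h1 : (a.take lo).countP (fun t => decide (t ≤ x)) = lo := by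
    rw [List.countP_eq_length.mpr, List.length_take]
    · omega
    · intro t ht
      obtain ⟨i, hi, rfl⟩ := List.mem_iff_getElem.mp ht
      simp only [List.length_take] at hi
      rw [List.getElem_take]
      exact decide_eq_true (hlow i (by omega) (by omega))
  have h2 : (a.drop lo).countP (fun t => decide (t ≤ x)) = 0 := by
    rw [List.countP_eq_zero]
    intro t ht
    obtain ⟨i, hi, rfl⟩ := List.mem_iff_getElem.mp ht
    simp only [List.length_drop] at hi
    rw [List.getElem_drop]
    have := hhigh (lo + i) (by omega) (by omega)
    simpa using by omega
  omega

lemma bisect_count (a : List Int) (x : Int)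
    (hmono : ∀ i j : Nat, (hij : i ≤ j) → (h : j < a.length) → a[i]'(by omega) ≤ a[j]) :
    ∀ n lo hi : Nat, hi - lo = n → lo ≤ hi → hi ≤ a.length →
    (∀ i : Nat, i < lo → (h : i < a.length) → a[i] ≤ x) →
    (∀ i : Nat, hi ≤ i → (h : i < a.length) → x < a[i]) →
    pvBisectAux a x lo hi = a.countP (fun t => decide (t ≤ x)) := by
  intro n
  induction n using Nat.strong_induction_on with
  | _ n ih =>
    intro lo hi hn hlh hha hlow hhigh
    rw [pvBisectAux]
    by_cases h : lo < hi
    · have hmid1 : lo ≤ (lo + hi) / 2 := by omega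
      have hmid2 : (lo + hi) / 2 < hi := by omega
      have hmlt : (lo + hi) / 2 < a.length := by omega
      have hgd : a.getD ((lo + hi) / 2) 0 = a[(lo + hi) / 2] := List.getD_eq_getElem a 0 hmlt
      by_cases hx : x < a.getD ((lo + hi) / 2) 0
      · simp only [h, dif_pos, hx, if_pos]
        exact ih ((lo + hi) / 2 - lo) (by omega) lo ((lo + hi) / 2) rfl (by omega) (by omega)
          hlow
          (fun i hi' hl => lt_of_lt_of_le (hgd ▸ hx) (hmono _ i hi' hl))
      · simp only [h, dif_pos, hx]
        exact ih (hi - ((lo + hi) / 2 + 1)) (by omega) ((lo + hi) / 2 + 1) hi rfl (by omega) hha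
          (fun i hi' hl => le_trans (hmono i _ (Nat.lt_succ_iff.mp hi') hmlt)
            (by rw [hgd] at hx; omega))
          hhigh
    · have : lo = hi := by omega
      subst this
      simp only [h]
      exact (countP_eq_split a x lo (by omega) hlow hhigh).symm

lemma bisect_eq_fold (a : List Int) (x : Int)
    (hmono : ∀ i j : Nat, (hij : i ≤ j) → (h : j < a.length) → a[i]'(by omega) ≤ a[j]) :
    pvBisectRight a x = a.foldl (fun c (t : Int) => if x ≥ t then c + 1 else c) 0 := by
  rw [pvBisectRight, fold_eq_countP,
    bisect_count a x hmono a.length 0 a.length rfl (by omega) le_rfl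
      (fun i hi _ => absurd hi (Nat.not_lt_zero i))
      (fun i hi hl => absurd hl (by omega))]

lemma mono_of_sorted (a : List Int) (hs : List.Pairwise (· ≤ ·) a) :
    ∀ i j : Nat, (hij : i ≤ j) → (h : j < a.length) → a[i]'(by omega) ≤ a[j] := by
  intro i j hij hj
  rcases Nat.lt_or_eq_of_le hij with hc | hc
  · exact List.pairwise_iff_getElem.mp hs i j (by omega) hj hc
  · subst hc; exact le_refl _

lemma portA_sum (t h a l : Int) :
    calculate_achievements_count_from_data_py t h a l =
      [1, 5, 10, 25, 50, 100, 150, 200, 250, 500, 1000].foldl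
        (fun c (u : Int) => if t ≥ u then c + 1 else c) 0
      + [1, 10, 50, 100, 250, 500, 1000, 2500].foldl
        (fun c (u : Int) => if h ≥ u then c + 1 else c) 0
      + [1, 3, 5, 10, 15, 20].foldl
        (fun c (u : Int) => if a ≥ u then c + 1 else c) 0
      + [1, 5, 10, 25, 50, 100, 250].foldl
        (fun c (u : Int) => if l ≥ u then c + 1 else c) 0 := by
  simp only [calculate_achievements_count_from_data_py]
  rw [foldl_count_shift, foldl_count_shift, foldl_count_shift]

-- ===== VERDICT (by name: the statement is the Claim_ definition above) =====
theorem calculate_achievements_count_from_data_py_spec : Claim_equal_calculate_achievements_count_from_data_py := by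
  intro t h a l _
  unfold Spec_calculate_achievements_count_from_data_py calculate_achievements_count_from_data_py_alt
  rw [portA_sum,
    bisect_eq_fold _ t (mono_of_sorted _ (by decide)),
    bisect_eq_fold _ h (mono_of_sorted _ (by decide)),
    bisect_eq_fold _ a (mono_of_sorted _ (by decide)),
    bisect_eq_fold _ l (mono_of_sorted _ (by decide))]
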